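-- pv_equiv track=rewrite | github.com/svrddd/killaX | core/analyzer.py | extract_4byte_selectors
-- ===== SOURCE A (Python) =====
-- def extract_4byte_selectors(bytecode: str) -> list:
--     selectors = []
--     for i in range(0, len(bytecode) - 8, 2):
--         if bytecode[i:i+2] in ("60", "63"):
--             selector = bytecode[i+2:i+10]
--             if len(selector) == 8:
--                 selectors.append(selector.lower())
--     return list(set(selectors))
-- ===== SOURCE B (Python) =====
-- def extract_4byte_selectors(bytecode: str) -> list:
--     # Jump-search: instead of scanning every even offset, repeatedly str.find the
--     # next occurrence of either opcode ("60"/"63") and process only those hits.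
--     n = len(bytecode)
--     found = set()
--     i = 0
--     while True:
--         a = bytecode.find("60", i)
--         b = bytecode.find("63", i)
--         if a == -1:
--             j = b
--         elif b == -1:
--             j = a
--         else:
--             j = min(a, b)
--         if j == -1:
--             break
--         if j % 2 == 0 and j + 10 <= n:
--             found.add(bytecode[j + 2:j + 10].lower())
--         i = j + 1
--     return list(found)
-- ===== Notes on version B (the rewrite author's own statement) =====
-- stated objective: faster
-- what changed: B replaces A's Python-level scan of every even character offset (slicing at each one) with a jump-search driven by str.find: it repeatedly locates the next occurrence of "60" or "63" (taking the earlier of the two), filters hits for even alignment and a full 8-char tail, and accumulates lowercased selectors directly into a set.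
import Mathlib
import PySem

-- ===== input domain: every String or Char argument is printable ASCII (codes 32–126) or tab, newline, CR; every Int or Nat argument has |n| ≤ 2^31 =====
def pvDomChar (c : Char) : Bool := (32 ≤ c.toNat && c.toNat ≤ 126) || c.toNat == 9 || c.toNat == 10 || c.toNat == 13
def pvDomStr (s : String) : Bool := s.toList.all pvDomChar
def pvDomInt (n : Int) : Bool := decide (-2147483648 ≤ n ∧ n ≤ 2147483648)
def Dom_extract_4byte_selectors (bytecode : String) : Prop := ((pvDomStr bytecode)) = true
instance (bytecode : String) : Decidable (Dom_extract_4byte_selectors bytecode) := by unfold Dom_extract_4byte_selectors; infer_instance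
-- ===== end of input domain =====

-- B replaces A's per-even-offset scan by a str.find-driven jump search over the
-- occurrences of "60"/"63" (filtering hits for even alignment and a full 8-char tail);
-- same deduplicated result (Python list(set(...))), measured faster in a timing run.

-- ===== PORT A =====
def extract_4byte_selectors (bytecode : String) : List String :=
  let selectors : List String :=
    (PySem.List.pyRange 0 (PySem.Str.len bytecode - 8) 2).foldl
      (fun selectors i =>
        if PySem.Str.slice bytecode (some i) (some (i + 2)) == "60"
            || PySem.Str.slice bytecode (some i) (some (i + 2)) == "63" then
          let selector := PySem.Str.slice bytecode (some (i + 2)) (some (i + 10))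
          if PySem.Str.len selector == 8 then
            selectors ++ [PySem.Str.lower selector]
          else selectors
        else selectors)
      []
  PySem.Set.ofList selectors

-- ===== PORT B =====
-- the if/elif/else chain choosing the next hit
def pvNext (a b : Int) : Int := if a = -1 then b else if b = -1 then a else min a b

-- the while loop of B, as the obvious recursion; the fuel argument (one unit per
-- iteration, |bytecode|+1 at entry suffices since the scan index strictly increases)
-- and the length guard only make the recursion total
def pvLoopB (s : String) (fuel : Nat) (i : Nat) (acc : List String) : List String :=
  match fuel with
  | 0 => acc
  | fuel + 1 =>
    if s.toList.length < i then acc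
    else
      let j := pvNext (PySem.Str.findFrom s "60" (i : Int) none)
        (PySem.Str.findFrom s "63" (i : Int) none)
      if j = -1 then acc
      else
        pvLoopB s fuel (j.toNat + 1)
          (if PySem.Int.mod j 2 == 0 && decide (j + 10 ≤ PySem.Str.len s) then
            PySem.Set.add acc
              (PySem.Str.lower (PySem.Str.slice s (some (j + 2)) (some (j + 10))))
          else acc)

def extract_4byte_selectors_alt (bytecode : String) : List String :=
  pvLoopB bytecode (bytecode.toList.length + 1) 0 PySem.Set.empty

-- ===== PRECONDITION & SPEC =====
def Spec_extract_4byte_selectors (bytecode : String) (out : List String) : Prop := out = extract_4byte_selectors_alt bytecode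
instance (bytecode : String) (out : List String) : Decidable (Spec_extract_4byte_selectors bytecode out) := by unfold Spec_extract_4byte_selectors; infer_instance

-- ===== CLAIM (what is proved, stated in full; the proofs are below) =====
def Claim_equal_extract_4byte_selectors : Prop := ∀ (bytecode : String), Dom_extract_4byte_selectors bytecode → Spec_extract_4byte_selectors bytecode (extract_4byte_selectors bytecode)

-- ===== LEMMAS AND PROOFS =====

-- which byte positions of cs carry an opcode occurrence 
def pvOccB (cs : List Char) (p : Nat) : Bool :=
  decide (("60" : String).toList <+: cs.drop p) || decide (("63" : String).toList <+: cs.drop p)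

-- what a single find-from-i says about occurrences of sub in cs at positions ≥ i
lemma pv_find_occ (cs : List Char) (i : Nat) (sub : List Char) :
    (PySem.Chars.find (cs.drop i) sub = -1 → ∀ p, i ≤ p → ¬ (sub <+: cs.drop p)) ∧
    (PySem.Chars.find (cs.drop i) sub ≠ -1 →
      (sub <+: cs.drop (i + (PySem.Chars.find (cs.drop i) sub).toNat)) ∧
      ∀ p, i ≤ p → p < i + (PySem.Chars.find (cs.drop i) sub).toNat → ¬ (sub <+: cs.drop p)) := by
  constructor
  · intro h p hp hpre
    have hnin : ¬ sub <:+: cs.drop i := (PySem.Chars.find_eq_neg_one_iff _ _).mp h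
    have hpq : sub <+: (cs.drop i).drop (p - i) := by
      rw [List.drop_drop, show i + (p - i) = p from by omega]; exact hpre
    have : PySem.Chars.isIn sub (cs.drop i) = true := by
      rw [← PySem.Chars.exists_prefix_drop_iff_isIn]
      exact ⟨p - i, hpq⟩
    exact hnin ((PySem.Chars.isIn_iff_infix _ _).mp this)
  · intro h
    have h0 : 0 ≤ PySem.Chars.find (cs.drop i) sub := by
      have := PySem.Chars.neg_one_le_find (cs.drop i) sub
      omega
    obtain ⟨h1, h2⟩ := PySem.Chars.find_spec (s := cs.drop i) (sub := sub) h0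
    rw [List.drop_drop] at h1
    refine ⟨h1, ?_⟩
    intro p hp hlt hpre
    have hpq : sub <+: (cs.drop i).drop (p - i) := by
      rw [List.drop_drop, show i + (p - i) = p from by omega]; exact hpre
    exact h2 (p - i) (by omega) hpq

-- next-hit analysis of the pvNext of the two finds
lemma pvNext_cases (cs : List Char) (i : Nat) (hi : i ≤ cs.length) :
    (pvNext (PySem.Chars.findFrom cs ("60" : String).toList (i : Int) none)
        (PySem.Chars.findFrom cs ("63" : String).toList (i : Int) none) = -1
      ∧ ∀ p, i ≤ p → pvOccB cs p = false)
    ∨ (∃ m : Nat,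
        pvNext (PySem.Chars.findFrom cs ("60" : String).toList (i : Int) none)
          (PySem.Chars.findFrom cs ("63" : String).toList (i : Int) none) = (m : Int)
        ∧ i ≤ m ∧ m + 2 ≤ cs.length ∧ pvOccB cs m = true
        ∧ ∀ p, i ≤ p → p < m → pvOccB cs p = false) := by
  have hA := PySem.Chars.findFrom_natCast cs ("60" : String).toList i hi
  have hB := PySem.Chars.findFrom_natCast cs ("63" : String).toList i hi
  set fa := PySem.Chars.find (cs.drop i) ("60" : String).toList with hfa
  set fb := PySem.Chars.find (cs.drop i) ("63" : String).toList with hfb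
  have ⟨hA1, hA2⟩ := pv_find_occ cs i ("60" : String).toList
  have ⟨hB1, hB2⟩ := pv_find_occ cs i ("63" : String).toList
  rw [← hfa] at hA1 hA2
  rw [← hfb] at hB1 hB2
  have hlen2 : ∀ m : Nat, ("60" : String).toList <+: cs.drop m ∨ ("63" : String).toList <+: cs.drop m → m + 2 ≤ cs.length := by
    intro m hm
    have h2 : 2 ≤ (cs.drop m).length := by
      rcases hm with hm | hm <;> simpa using hm.length_le
    simp only [List.length_drop] at h2
    omega
  by_cases ha : fa = -1 <;> by_cases hb : fb = -1
  · left
    constructor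
    · rw [hA, hB, if_pos ha, if_pos hb]; rfl
    · intro p hp
      simp only [pvOccB, Bool.or_eq_false_iff, decide_eq_false_iff_not]
      exact ⟨hA1 ha p hp, hB1 hb p hp⟩
  · -- only "63" occurs
    right
    obtain ⟨hocc, hmin⟩ := hB2 hb
    have hb0 : 0 ≤ fb := by have := PySem.Chars.neg_one_le_find (cs.drop i) ("63" : String).toList; omega
    refine ⟨i + fb.toNat, ?_, by omega, hlen2 _ (Or.inr hocc), ?_, ?_⟩
    · rw [hA, hB, if_pos ha, if_neg hb]
      simp only [pvNext]
      split_ifs with h <;> omega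
    · simp only [pvOccB, Bool.or_eq_true, decide_eq_true_eq]; right; exact hocc
    · intro p hp hplt
      simp only [pvOccB, Bool.or_eq_false_iff, decide_eq_false_iff_not]
      exact ⟨hA1 ha p hp, hmin p hp hplt⟩
  · -- only "60" occurs
    right
    obtain ⟨hocc, hmin⟩ := hA2 ha
    have ha0 : 0 ≤ fa := by have := PySem.Chars.neg_one_le_find (cs.drop i) ("60" : String).toList; omega
    refine ⟨i + fa.toNat, ?_, by omega, hlen2 _ (Or.inl hocc), ?_, ?_⟩
    · rw [hA, hB, if_neg ha, if_pos hb]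
      simp only [pvNext]
      split_ifs <;> omega
    · simp only [pvOccB, Bool.or_eq_true, decide_eq_true_eq]; left; exact hocc
    · intro p hp hplt
      simp only [pvOccB, Bool.or_eq_false_iff, decide_eq_false_iff_not]
      exact ⟨hmin p hp hplt, hB1 hb p hp⟩
  · -- both occur: the earlier one wins
    right
    obtain ⟨hocca, hmina⟩ := hA2 ha
    obtain ⟨hoccb, hminb⟩ := hB2 hb
    have ha0 : 0 ≤ fa := by have := PySem.Chars.neg_one_le_find (cs.drop i) ("60" : String).toList; omega
    have hb0 : 0 ≤ fb := by have := PySem.Chars.neg_one_le_find (cs.drop i) ("63" : String).toList; omega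
    have hnext : pvNext (PySem.Chars.findFrom cs ("60" : String).toList (i : Int) none)
        (PySem.Chars.findFrom cs ("63" : String).toList (i : Int) none)
        = ((i + min fa.toNat fb.toNat : Nat) : Int) := by
      rw [hA, hB, if_neg ha, if_neg hb]
      simp only [pvNext]
      split_ifs with h1 h2 <;> [omega; omega; (rw [Int.min_def]; split_ifs with h3 <;> omega)]
    refine ⟨i + min fa.toNat fb.toNat, hnext, by omega, ?_, ?_, ?_⟩
    · rcases Nat.le_total fa.toNat fb.toNat with h | h
      · rw [Nat.min_eq_left h]; exact hlen2 _ (Or.inl hocca)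
      · rw [Nat.min_eq_right h]; exact hlen2 _ (Or.inr hoccb)
    · simp only [pvOccB, Bool.or_eq_true, decide_eq_true_eq]
      rcases Nat.le_total fa.toNat fb.toNat with h | h
      · rw [Nat.min_eq_left h]; left; exact hocca
      · rw [Nat.min_eq_right h]; right; exact hoccb
    · intro p hp hplt
      simp only [pvOccB, Bool.or_eq_false_iff, decide_eq_false_iff_not]
      exact ⟨hmina p hp (by omega), hminb p hp (by omega)⟩


-- the 2-char token starting at character offset 2*k
def pvTok (s : String) (k : Nat) : String :=
  PySem.Str.slice s (some (2 * (k : Int))) (some (2 * (k : Int) + 2))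

-- the common per-index guard of A (token index k)
def pvGuard (s : String) (k : Nat) : Bool :=
  (pvTok s k == "60" || pvTok s k == "63") && decide (2 * k + 10 ≤ s.toList.length)

-- the appended value, as a function of the character offset p
def pvValN (s : String) (p : Nat) : String :=
  PySem.Str.lower (PySem.Str.slice s (some ((p : Int) + 2)) (some ((p : Int) + 10)))

-- number of loop iterations of A / number of byte tokens
def pvMA (s : String) : Nat := (s.toList.length - 7) / 2
def pvL (s : String) : Nat := (s.toList.length + 1) / 2

-- occurrence positions ≥ i, in increasing order
def pvOccs (cs : List Char) (i : Nat) : List Nat :=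
  (List.range' i (cs.length - i)).filter (pvOccB cs)

-- the per-hit step of B
def pvStepN (s : String) (acc : List String) (p : Nat) : List String :=
  if p % 2 == 0 && decide (p + 10 ≤ s.toList.length) then
    PySem.Set.add acc (pvValN s p)
  else acc

lemma pv_slice_toList (s : String) (a b : Int) (ha : 0 ≤ a) (hb : 0 ≤ b) :
    (PySem.Str.slice s (some a) (some b)).toList
      = List.take (b.toNat - a.toNat) (List.drop a.toNat s.toList) := by
  simp [PySem.Str.slice]
  rw [PySem.List.slice_toNat (ha := ha) (hb := hb)]

lemma pv_tok_toList (s : String) (k : Nat) :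
    (pvTok s k).toList = List.take 2 (List.drop (2 * k) s.toList) := by
  rw [pvTok, pv_slice_toList s _ _ (by positivity) (by positivity),
    show (2*(k:Int)+2).toNat - (2*(k:Int)).toNat = 2 from by omega,
    show (2*(k:Int)).toNat = 2*k from by omega]

-- a loop of shape "append the value when the guard holds"
lemma pv_loop (g : Nat → Bool) (v : Nat → String) (f : List String → Nat → List String) :
    ∀ (l : List Nat), (∀ (acc : List String) (k : Nat), k ∈ l →
        f acc k = if g k = true then acc ++ [v k] else acc) →
      ∀ (acc : List String), l.foldl f acc = acc ++ (l.filter g).map v := by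
  intro l
  induction l with
  | nil => intro _ acc; simp
  | cons x xs ih =>
    intro hf acc
    rw [List.foldl_cons, hf acc x (List.mem_cons_self)]
    by_cases h : g x = true
    · rw [if_pos h, ih (fun a k hk => hf a k (List.mem_cons_of_mem _ hk)),
        List.filter_cons_of_pos h]
      simp
    · rw [if_neg h, ih (fun a k hk => hf a k (List.mem_cons_of_mem _ hk)),
        List.filter_cons_of_neg h]

lemma pv_len_slice_eq_guard (s : String) (k : Nat) :
    ((((PySem.Str.slice s (some (2 * (k:Int) + 2)) (some (2 * (k:Int) + 10))).toList.length : Nat) : Int) == 8)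
      = decide (2 * k + 10 ≤ s.toList.length) := by
  rw [pv_slice_toList s _ _ (by positivity) (by positivity)]
  apply Bool.eq_iff_iff.mpr
  simp only [beq_iff_eq, decide_eq_true_eq, List.length_take, List.length_drop]
  omega

-- A's loop computes exactly the guarded values over its iteration range
lemma pvA_eq (s : String) :
    extract_4byte_selectors s
      = PySem.Set.ofList (((List.range (pvMA s)).filter (pvGuard s)).map (fun k => pvValN s (2 * k))) := by
  have hm : (if (0:Int) < (s.toList.length : Int) - 8 then
      (((s.toList.length : Int) - 8 - 0 + 2 - 1) / 2).toNat else 0) = pvMA s := by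
    rw [pvMA]; split_ifs with h <;> omega
  simp only [extract_4byte_selectors, PySem.Str.len_eq]
  rw [PySem.List.pyRange_of_pos 0 _ (by norm_num : (0:Int) < 2), List.foldl_map, hm]
  rw [pv_loop (pvGuard s) (fun k => pvValN s (2 * k)) _ _ (by
    intro acc k _
    simp only [zero_add]
    rw [pv_len_slice_eq_guard s k]
    have hcast2 : ((2 * k : Nat) : Int) + 2 = 2 * (k : Int) + 2 := by push_cast; ring
    have hcast10 : ((2 * k : Nat) : Int) + 10 = 2 * (k : Int) + 10 := by push_cast; ring
    simp only [pvGuard, pvTok, pvValN, hcast2, hcast10]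
    cases hc : (PySem.Str.slice s (some (2 * (k:Int))) (some (2 * (k:Int) + 2)) == "60"
        || PySem.Str.slice s (some (2 * (k:Int))) (some (2 * (k:Int) + 2)) == "63") <;>
      cases hd : decide (2 * k + 10 ≤ s.toList.length) <;> simp)]
  simp

-- the guard can only hold below A's iteration bound
lemma pv_guard_lt (s : String) (k : Nat) (h : pvGuard s k = true) : k < pvMA s := by
  rw [pvGuard, Bool.and_eq_true, decide_eq_true_eq] at h
  rw [pvMA]
  omega

lemma pv_filter_range_eq (s : String) :
    (List.range (pvL s)).filter (pvGuard s) = (List.range (pvMA s)).filter (pvGuard s) := by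
  have hle : pvMA s ≤ pvL s := by rw [pvMA, pvL]; omega
  have hsplit : pvL s = pvMA s + (pvL s - pvMA s) := by omega
  rw [hsplit, List.range_add, List.filter_append]
  have h2 : ((List.range (pvL s - pvMA s)).map (fun x => pvMA s + x)).filter (pvGuard s) = [] := by
    rw [List.filter_eq_nil_iff]
    intro a ha
    rcases List.mem_map.mp ha with ⟨x, _, rfl⟩
    intro hg
    have := pv_guard_lt s _ hg
    omega
  rw [h2, List.append_nil]

-- decomposing the occurrence list at its first element
lemma pvOccs_decomp (cs : List Char) (i m : Nat) (him : i ≤ m) (hm2 : m + 2 ≤ cs.length)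
    (hocc : pvOccB cs m = true) (hmin : ∀ p, i ≤ p → p < m → pvOccB cs p = false) :
    pvOccs cs i = m :: pvOccs cs (m + 1) := by
  unfold pvOccs
  rw [show cs.length - i = (m - i) + (cs.length - m) from by omega, ← List.range'_append,
    show i + 1 * (m - i) = m from by omega, List.filter_append]
  have hnil : (List.range' i (m - i)).filter (pvOccB cs) = [] := by
    rw [List.filter_eq_nil_iff]
    intro p hp
    rw [List.mem_range'_1] at hp
    simp [hmin p hp.1 (by omega)]
  have hcons : List.range' m (cs.length - m) = m :: List.range' (m + 1) (cs.length - (m + 1)) := by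
    rw [show cs.length - m = (cs.length - (m + 1)) + 1 from by omega, List.range'_succ]
  rw [hnil, hcons, List.filter_cons_of_pos hocc]
  simp

-- B's loop consumes exactly the occurrence list from i on (given enough fuel)
lemma pvLoopB_eq (s : String) : ∀ (fuel i : Nat) (acc : List String),
    s.toList.length + 1 ≤ fuel + i →
    pvLoopB s fuel i acc = (pvOccs s.toList i).foldl (pvStepN s) acc := by
  intro fuel
  induction fuel with
  | zero =>
    intro i acc h
    simp only [pvLoopB, pvOccs]
    rw [show s.toList.length - i = 0 from by omega]
    simp
  | succ fuel ih =>
    intro i acc h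
    rw [pvLoopB]
    by_cases hlt : s.toList.length < i
    · rw [if_pos hlt]
      simp only [pvOccs]
      rw [show s.toList.length - i = 0 from by omega]
      simp
    · rw [if_neg hlt]
      simp only [PySem.Str.findFrom_eq]
      rcases pvNext_cases s.toList i (by omega) with ⟨hnil, hall⟩ | ⟨m, hm, him, hm2, hocc, hmin⟩
      · simp only [hnil]
        have hocc0 : pvOccs s.toList i = [] := by
          rw [pvOccs, List.filter_eq_nil_iff]
          intro p hp
          rw [List.mem_range'_1] at hp
          simp [hall p hp.1]
        simp [hocc0]
      · simp only [hm]
        have hne : ¬ ((m : Int) = -1) := by omega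
        simp only [if_neg hne, Int.toNat_natCast]
        have hstep :
            (if (PySem.Int.mod ((m : Nat) : Int) 2 == 0 && decide (((m : Nat) : Int) + 10 ≤ PySem.Str.len s)) = true then
              PySem.Set.add acc (PySem.Str.lower (PySem.Str.slice s (some (((m : Nat) : Int) + 2)) (some (((m : Nat) : Int) + 10))))
            else acc) = pvStepN s acc m := by
          rw [pvStepN, pvValN]
          have hc : (PySem.Int.mod ((m : Nat) : Int) 2 == 0 && decide (((m : Nat) : Int) + 10 ≤ PySem.Str.len s))
              = ((m % 2 == 0) && decide (m + 10 ≤ s.toList.length)) := by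
            rw [PySem.Int.mod_eq_emod_of_pos (by norm_num : (0:Int) < 2)]
            simp only [PySem.Str.len_eq]
            congr 1
            · apply Bool.eq_iff_iff.mpr; simp only [beq_iff_eq]; omega
            · apply Bool.eq_iff_iff.mpr; simp only [decide_eq_true_eq]; omega
          rw [hc]
        rw [pvOccs_decomp s.toList i m him hm2 hocc hmin, List.foldl_cons, hstep,
          ih (m + 1) (pvStepN s acc m) (by omega)]

-- a loop of shape "Set.add the value when the guard holds"
lemma pv_loop_add (g : Nat → Bool) (v : Nat → String) (f : List String → Nat → List String) :
    ∀ (l : List Nat), (∀ (acc : List String) (k : Nat), k ∈ l →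
        f acc k = if g k = true then PySem.Set.add acc (v k) else acc) →
      ∀ (acc : List String), l.foldl f acc = ((l.filter g).map v).foldl PySem.Set.add acc := by
  intro l
  induction l with
  | nil => intro _ acc; simp
  | cons x xs ih =>
    intro hf acc
    rw [List.foldl_cons, hf acc x (List.mem_cons_self)]
    by_cases h : g x = true
    · rw [if_pos h, ih (fun a k hk => hf a k (List.mem_cons_of_mem _ hk)),
        List.filter_cons_of_pos h]
      simp
    · rw [if_neg h, ih (fun a k hk => hf a k (List.mem_cons_of_mem _ hk)),
        List.filter_cons_of_neg h]

-- even-position filter of range n = doubled filter of range ⌈n/2⌉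
lemma pv_even_filter (Q : Nat → Bool) : ∀ (n : Nat),
    (List.range n).filter (fun p => (p % 2 == 0) && Q p)
      = ((List.range ((n + 1) / 2)).filter (fun k => Q (2 * k))).map (fun k => 2 * k) := by
  intro n
  induction n with
  | zero => simp
  | succ n ih =>
    rw [List.range_succ, List.filter_append, ih]
    rcases Nat.even_or_odd n with ⟨t, ht⟩ | ⟨t, ht⟩
    · have h1 : (n + 1) / 2 = t := by omega
      have h2 : (n + 1 + 1) / 2 = t + 1 := by omega
      have hmod : (n % 2 == 0) = true := by simp; omega
      have h2t : 2 * t = n := by omega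
      rw [h1, h2, List.range_succ, List.filter_append, List.map_append]
      congr 1
      simp only [List.filter_singleton, hmod, Bool.true_and, h2t]
      cases hq : Q n with
      | false => simp
      | true => simp; omega
    · have h1 : (n + 1) / 2 = t + 1 := by omega
      have h2 : (n + 1 + 1) / 2 = t + 1 := by omega
      have hmod : (n % 2 == 0) = false := by simp; omega
      rw [h1, h2]
      simp [hmod]

-- the two opcode tests agree
lemma pv_occ_eq_tok (s : String) (k : Nat) :
    pvOccB s.toList (2 * k) = (pvTok s k == "60" || pvTok s k == "63") := by
  have htok : ∀ op : String, op.toList.length = 2 →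
      (decide (op.toList <+: s.toList.drop (2 * k))) = (pvTok s k == op) := by
    intro op hop
    apply Bool.eq_iff_iff.mpr
    simp only [decide_eq_true_eq, beq_iff_eq]
    constructor
    · intro h
      have h' := List.prefix_iff_eq_take.mp h
      rw [hop] at h'
      apply String.toList_inj.mp
      rw [pv_tok_toList]
      exact h'.symm
    · intro h
      apply List.prefix_iff_eq_take.mpr
      rw [hop, ← pv_tok_toList, h]
  simp only [pvOccB, htok "60" (by decide), htok "63" (by decide)]

-- ===== VERDICT (by name: the statement is the Claim_ definition above) =====
theorem extract_4byte_selectors_spec : Claim_equal_extract_4byte_selectors := by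
  intro s _
  show extract_4byte_selectors s = extract_4byte_selectors_alt s
  rw [pvA_eq, ← pv_filter_range_eq, extract_4byte_selectors_alt,
    pvLoopB_eq s (s.toList.length + 1) 0 PySem.Set.empty (by omega)]
  have h0 : pvOccs s.toList 0 = (List.range s.toList.length).filter (pvOccB s.toList) := by
    rw [pvOccs, Nat.sub_zero, List.range_eq_range']
  rw [h0, pv_loop_add (fun p => (p % 2 == 0) && decide (p + 10 ≤ s.toList.length)) (pvValN s)
      (pvStepN s) _ (fun acc k _ => rfl) PySem.Set.empty,
    List.filter_filter]
  have hpred : ∀ p ∈ List.range s.toList.length,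
      (((p % 2 == 0) && decide (p + 10 ≤ s.toList.length)) && pvOccB s.toList p)
        = ((p % 2 == 0) && (pvOccB s.toList p && decide (p + 10 ≤ s.toList.length))) := by
    intro p _
    cases (p % 2 == 0) <;> cases pvOccB s.toList p <;> cases decide (p + 10 ≤ s.toList.length) <;> rfl
  rw [List.filter_congr hpred,
    pv_even_filter (fun p => pvOccB s.toList p && decide (p + 10 ≤ s.toList.length)) s.toList.length,
    List.map_map]
  have hpred2 : ∀ k ∈ List.range ((s.toList.length + 1) / 2),
      (pvOccB s.toList (2 * k) && decide (2 * k + 10 ≤ s.toList.length)) = pvGuard s k := by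
    intro k _
    rw [pv_occ_eq_tok, pvGuard]
  rw [List.filter_congr hpred2, PySem.Set.ofList_eq_foldl]
  rfl
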